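-- pv_equiv track=rewrite | github.com/KEUMIN/algorithm_2024 | R3/389481.py | solution
-- ===== SOURCE A (Python) =====
-- from bisect import bisect_right
--
-- def get_sum(n):
--     return (26 * ((26**n) - 1)) // (26 - 1) if n > 0 else 0
--
-- def idx_to_str(idx):
--     L = 1
--     while get_sum(L) < idx:
--         L += 1
--
--     pure_idx = idx - get_sum(L - 1) - 1
--     arr = []
--     for i in range(L - 1, -1, -1):
--         arr.append(chr(ord("a") + pure_idx % 26))
--         pure_idx //= 26
--
--     arr.reverse()
--     return "".join(arr)
--
-- def str_to_idx(s):
--     L = len(s)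
--     idx = 0
--     for c in s:
--         idx = (idx * 26) + (ord(c) - ord("a"))
--
--     return idx + get_sum(L - 1) + 1
--
-- def solution(n, bans):
--     bans_idx = sorted([str_to_idx(b) for b in bans])
--     left, right = 1, 10**15
--     while left <= right:
--         mid = (left + right) // 2
--         kept = mid - bisect_right(bans_idx, mid)
--         if kept >= n:
--             right = mid - 1
--         else:
--             left = mid + 1
--
--     return idx_to_str(left)
-- ===== SOURCE B (Python) =====
-- # B: names are numbers in bijective base-26 (Excel-column style); find the n-th
-- # free number with one forward walk over the sorted banned numbers (objective:
-- # simpler -- no length buckets, no binary search).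
--
-- def to_num(s):
--     v = 0
--     for c in s:
--         v = v * 26 + (ord(c) - ord('a') + 1)
--     return v
--
-- def to_str(v):
--     out = []
--     while v > 0:
--         v -= 1
--         out.append(chr(ord('a') + v % 26))
--         v //= 26
--     out.reverse()
--     return ''.join(out)
--
-- def solution(n, bans):
--     target = n
--     for b in sorted(to_num(s) for s in bans):
--         if b <= target:
--             target += 1
--     return to_str(target)
-- ===== Notes on version B (the rewrite author's own statement) =====
-- stated objective: simpler
-- what changed: A numbers names by length buckets (get_sum) and binary-searches [1,10**15] with bisect_right probes for the smallest index with enough non-banned names below it; B numbers names directly in bijective base-26 (Excel-column style, no length buckets) and finds the n-th free number with one forward walk over the sorted banned numbers. Pre_ keeps the natural domain: it excludes nonpositive ranks n (a rank is positive; …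
-- outside the precondition, e.g. on solution(0, []): A returns 'a', B returns ''; on solution(2, ['c', 'c']): A returns 'd', B returns 'b'
import Mathlib
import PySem

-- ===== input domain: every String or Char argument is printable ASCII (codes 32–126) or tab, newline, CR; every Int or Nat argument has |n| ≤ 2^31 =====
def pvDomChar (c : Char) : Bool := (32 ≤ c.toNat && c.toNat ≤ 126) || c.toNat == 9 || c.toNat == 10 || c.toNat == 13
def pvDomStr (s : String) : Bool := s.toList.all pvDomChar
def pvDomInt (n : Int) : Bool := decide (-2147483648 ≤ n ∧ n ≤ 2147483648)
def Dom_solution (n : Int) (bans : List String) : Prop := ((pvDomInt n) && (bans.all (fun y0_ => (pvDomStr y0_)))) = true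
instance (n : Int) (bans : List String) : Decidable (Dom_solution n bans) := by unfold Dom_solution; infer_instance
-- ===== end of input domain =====

-- B numbers names in bijective base-26 and walks once over the sorted banned numbers,
-- instead of A's length-bucketed numbering plus a binary search over [1, 10**15] (objective: simpler).

-- ===== PORT A =====
def getSum (n : Int) : Int :=
  if n > 0 then PySem.Int.floordiv (26 * (26 ^ n.toNat - 1)) (26 - 1) else 0

-- termination facts for A's while-loops (cited in decreasing_by)
theorem pow26_ge (k : Nat) : 25 * k + 1 ≤ 26 ^ k := by
  induction k with
  | zero => exact Nat.le_refl 1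
  | succ m ih =>
    have h1 : 25 * (m + 1) + 1 = (25 * m + 1) + 25 := by ring
    have h2 : (25 * m + 1) + 25 ≤ 26 ^ m + 25 := Nat.add_le_add_right ih 25
    have h3 : (25 : Nat) ≤ 25 * 26 ^ m := Nat.le_mul_of_pos_right 25 (Nat.pow_pos (n := m) (show 0 < 26 by decide))
    have h4 : 26 ^ m + 25 ≤ 26 ^ m + 25 * 26 ^ m := Nat.add_le_add_left h3 _
    have h5 : 26 ^ m + 25 * 26 ^ m = 26 ^ (m + 1) := by ring
    rw [h1, ← h5]
    exact le_trans h2 h4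

theorem getSum_lt_imp (L idx : Int) (h : getSum L < idx) : L < idx := by
  by_cases hL : L > 0
  · have hk : (L.toNat : Int) = L := Int.toNat_of_nonneg (le_of_lt hL)
    have h1 : 25 * (L.toNat : Int) + 1 ≤ 26 ^ L.toNat := by exact_mod_cast pow26_ge L.toNat
    have h2 : L ≤ getSum L := by
      unfold getSum
      rw [if_pos hL,
        (PySem.Int.le_floordiv_iff_mul_le (a := 26 * (26 ^ L.toNat - 1)) (b := (26 - 1)) (q := L) (by decide))]
      linarith [h1, hk, le_of_lt hL]
    exact lt_of_le_of_lt h2 h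
  · have h0 : getSum L = 0 := by unfold getSum; rw [if_neg hL]
    have h2 : L ≤ getSum L := h0 ▸ (not_lt.mp hL)
    exact lt_of_le_of_lt h2 h

theorem findL_dec (idx L : Int) (h : getSum L < idx) :
    (idx - (L + 1)).toNat < (idx - L).toNat := by
  have hL : L < idx := getSum_lt_imp L idx h
  exact (Int.toNat_lt_toNat (Int.sub_pos.mpr hL)).mpr (sub_lt_sub_left (lt_add_one L) idx)

def findL (idx L : Int) : Int :=
  if getSum L < idx then findL idx (L + 1) else L
termination_by (idx - L).toNat
decreasing_by exact findL_dec idx L (by assumption)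

def idxToStr (idx : Int) : String :=
  let L := findL idx 1
  let pureIdx := idx - getSum (L - 1) - 1
  let st := (PySem.List.pyRange (L - 1) (-1) (-1)).foldl
    (fun (st : List Char × Int) _ =>
      (st.1 ++ [Char.ofNat (97 + PySem.Int.mod st.2 26).toNat], PySem.Int.floordiv st.2 26))
    ([], pureIdx)
  String.ofList st.1.reverse

def strToIdx (s : String) : Int :=
  let L : Int := PySem.Str.len s
  (s.toList.foldl (fun idx c => idx * 26 + ((c.toNat : Int) - 97)) 0) + getSum (L - 1) + 1

-- A's while-loop binary search; bisect_right on the sorted list is PySem.List.bisectRight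
theorem bs_dec_left (left right : Int) (h : left ≤ right) :
    (PySem.Int.floordiv (left + right) 2 - 1 + 1 - left).toNat < (right + 1 - left).toNat := by
  obtain ⟨hm1, hm2⟩ := PySem.Int.floordiv_two_mid_bounds h
  rw [sub_add_cancel]
  have hb : 0 < right + 1 - left := Int.sub_pos.mpr (Int.lt_add_one_iff.mpr h)
  have hlt : PySem.Int.floordiv (left + right) 2 - left < right + 1 - left :=
    sub_lt_sub_right (Int.lt_add_one_iff.mpr hm2) left
  exact (Int.toNat_lt_toNat hb).mpr hlt

theorem bs_dec_right (left right : Int) (h : left ≤ right) :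
    (right + 1 - (PySem.Int.floordiv (left + right) 2 + 1)).toNat < (right + 1 - left).toNat := by
  obtain ⟨hm1, hm2⟩ := PySem.Int.floordiv_two_mid_bounds h
  rw [add_sub_add_right_eq_sub]
  have hb : 0 < right + 1 - left := Int.sub_pos.mpr (Int.lt_add_one_iff.mpr h)
  have h3 : right - PySem.Int.floordiv (left + right) 2 ≤ right - left := sub_le_sub_left hm1 right
  have h4 : right - left < right + 1 - left := sub_lt_sub_right (lt_add_one right) left
  exact (Int.toNat_lt_toNat hb).mpr (lt_of_le_of_lt h3 h4)

def bsearchLoop (xs : List Int) (n left right : Int) : Int :=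
  if left ≤ right then
    let mid := PySem.Int.floordiv (left + right) 2
    let kept := mid - (PySem.List.bisectRight xs mid : Int)
    if kept ≥ n then bsearchLoop xs n left (mid - 1)
    else bsearchLoop xs n (mid + 1) right
  else left
termination_by (right + 1 - left).toNat
decreasing_by
  · exact bs_dec_left left right (by assumption)
  · exact bs_dec_right left right (by assumption)

def solution (n : Int) (bans : List String) : String :=
  let bansIdx := PySem.List.sorted (bans.map strToIdx) (fun x => x) false
  idxToStr (bsearchLoop bansIdx n 1 (10 ^ 15))

-- ===== PORT B =====
def toNum (s : String) : Int :=
  s.toList.foldl (fun v c => v * 26 + ((c.toNat : Int) - 97 + 1)) 0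

theorem toStrLoop_dec (v : Int) (h : v > 0) : (PySem.Int.floordiv (v - 1) 26).toNat < v.toNat := by
  rw [PySem.Int.floordiv_eq_ediv_of_pos (by omega)]
  omega

def toStrLoop (v : Int) (out : List Char) : List Char :=
  if v > 0 then
    toStrLoop (PySem.Int.floordiv (v - 1) 26)
      (out ++ [Char.ofNat (97 + PySem.Int.mod (v - 1) 26).toNat])
  else out
termination_by v.toNat
decreasing_by exact toStrLoop_dec v (by assumption)

def toStr (v : Int) : String := String.ofList (toStrLoop v []).reverse

def solution_alt (n : Int) (bans : List String) : String :=
  let bansIdx := PySem.List.sorted (bans.map toNum) (fun x => x) false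
  toStr (bansIdx.foldl (fun t b => if b ≤ t then t + 1 else t) n)

-- ===== PRECONDITION & SPEC =====
-- how many ban indices are ≤ x (used by Pre_ below and by the proofs)
def cntLe (xs : List Int) (x : Int) : Int := (xs.countP (fun b => decide (b ≤ x)) : Int)

-- Pre_ keeps the task's natural domain: it excludes nonpositive ranks n (a rank is positive;
-- there A's search floor makes it answer "a" regardless of the bans), inputs whose answer would
-- pass A's hard-coded search ceiling 10^15 (n + bans.length > 10^15 — unreachable for any
-- materializable input, since |n| ≤ 2^31), and ban lists with a repeated ban index v at the
-- requested rank boundary, where A's binary search runs over a non-monotone kept-count and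
-- returns an accidental probe point.
def Pre_solution (n : Int) (bans : List String) : Prop :=
  1 ≤ n ∧ n + (bans.length : Int) ≤ 10 ^ 15 ∧
  ∀ v ∈ bans.map strToIdx, 2 ≤ (bans.map strToIdx).count v →
    (v - 1 - cntLe (bans.map strToIdx) (v - 1) < n ∨
     n + ((bans.map strToIdx).count v : Int) - 2 < v - 1 - cntLe (bans.map strToIdx) (v - 1))
instance (n : Int) (bans : List String) : Decidable (Pre_solution n bans) := by
  unfold Pre_solution; infer_instance

def pvWitness_solution : Int × List String := (1, ["a", "b"])

def Spec_solution (n : Int) (bans : List String) (out : String) : Prop := out = solution_alt n bans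
instance (n : Int) (bans : List String) (out : String) : Decidable (Spec_solution n bans out) := by
  unfold Spec_solution; infer_instance

-- ===== CLAIM (what is proved, stated in full; the proofs are below) =====
def Claim_equal_solution : Prop := ∀ (n : Int) (bans : List String), Dom_solution n bans → Pre_solution n bans → Spec_solution n bans (solution n bans)

-- ===== LEMMAS AND PROOFS =====

-- the repunit 1 + 26 + … + 26^(k-1): the bijective-base-26 value of "aa…a" (k letters)
def rep : Nat → Int
  | 0 => 0
  | k + 1 => 26 * rep k + 1

theorem rep_nonneg (k : Nat) : 0 ≤ rep k := by
  induction k with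
  | zero => simp [rep]
  | succ m ih => simp only [rep]; omega

theorem rep_formula (k : Nat) : 25 * rep k = 26 ^ k - 1 := by
  induction k with
  | zero => simp [rep]
  | succ m ih =>
    have hp : (26 : Int) ^ (m + 1) = 26 ^ m * 26 := pow_succ 26 m
    simp only [rep]
    rw [hp]
    linarith [ih]

theorem rep_succ' (k : Nat) : rep (k + 1) = rep k + 26 ^ k := by
  have h := rep_formula k
  simp only [rep]
  linarith

theorem rep_mono {a b : Nat} (h : a ≤ b) : rep a ≤ rep b := by
  induction b, h using Nat.le_induction with
  | base => exact le_refl _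
  | succ m hm ih =>
    have := rep_nonneg m
    simp only [rep]
    omega

theorem rep_one_le (k : Nat) (hk : 1 ≤ k) : 1 ≤ rep k := by
  have h := rep_mono hk
  simpa [rep] using h

theorem getSum_eq (k : Nat) : getSum (k : Int) = rep (k + 1) - 1 := by
  cases k with
  | zero => simp [getSum, rep]
  | succ m =>
    have hpos : ((m + 1 : Nat) : Int) > 0 := by positivity
    unfold getSum
    rw [if_pos hpos]
    have htn : ((m + 1 : Nat) : Int).toNat = m + 1 := Int.toNat_natCast (m + 1)
    rw [htn]
    have hnum : 26 * ((26 : Int) ^ (m + 1) - 1) = 25 * (26 * rep (m + 1)) := by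
      have h := rep_formula (m + 1)
      linarith
    have h25 : (26 - 1 : Int) = 25 := by norm_num
    rw [h25, hnum, PySem.Int.floordiv_eq_ediv_of_pos (by norm_num : (0:Int) < 25),
      Int.mul_ediv_cancel_left _ (by norm_num : (25:Int) ≠ 0)]
    simp [rep]

-- A's length loop: findL lands exactly on the digit count k of v (rep k ≤ v < rep (k+1))
theorem findL_eq_aux (v : Int) (k : Nat) (h1 : rep k ≤ v) (h2 : v < rep (k + 1)) :
    ∀ (m j : Nat), k = j + m → 1 ≤ j → findL v (j : Int) = (k : Int) := by
  intro m
  induction m with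
  | zero =>
    intro j hj _
    have hjk : j = k := by omega
    subst hjk
    rw [findL]
    have hns : ¬ getSum (j : Int) < v := by
      rw [getSum_eq j]
      omega
    rw [if_neg hns]
  | succ m ih =>
    intro j hj hj1
    rw [findL]
    have hlt : getSum (j : Int) < v := by
      rw [getSum_eq j]
      have : rep (j + 1) ≤ rep k := rep_mono (by omega)
      omega
    rw [if_pos hlt]
    have hcast : (j : Int) + 1 = ((j + 1 : Nat) : Int) := by push_cast; ring
    rw [hcast]
    exact ih (j + 1) (by omega) (by omega)

-- every v ≥ 1 has a digit count
theorem exists_digits (v : Int) (hv : 1 ≤ v) :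
    ∃ k : Nat, 1 ≤ k ∧ rep k ≤ v ∧ v < rep (k + 1) := by
  induction v, hv using Int.le_induction with
  | base =>
    refine ⟨1, le_refl 1, ?_, ?_⟩ <;> simp [rep]
  | succ w hw ih =>
    obtain ⟨k, hk1, hk2, hk3⟩ := ih
    by_cases h : w + 1 < rep (k + 1)
    · exact ⟨k, hk1, by omega, h⟩
    · have heq : w + 1 = rep (k + 1) := by omega
      refine ⟨k + 1, by omega, by omega, ?_⟩
      have h0 := rep_nonneg (k + 1)
      have hr2 : rep (k + 1 + 1) = 26 * rep (k + 1) + 1 := rfl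
      omega

-- the digit list A's inner loop produces (low digit first)
def digitsA : Nat → Int → List Char
  | 0, _ => []
  | k + 1, p =>
    Char.ofNat (97 + PySem.Int.mod p 26).toNat :: digitsA k (PySem.Int.floordiv p 26)

theorem foldA_digits (xs : List Int) : ∀ (acc : List Char) (p : Int),
    (xs.foldl
      (fun (st : List Char × Int) _ =>
        (st.1 ++ [Char.ofNat (97 + PySem.Int.mod st.2 26).toNat], PySem.Int.floordiv st.2 26))
      (acc, p)).1 = acc ++ digitsA xs.length p := by
  induction xs with
  | nil => intro acc p; simp [digitsA]
  | cons a t ih =>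
    intro acc p
    simp only [List.foldl_cons, List.length_cons, digitsA]
    rw [ih]
    simp

theorem toStrLoop_stop (v : Int) (h : ¬ v > 0) (acc : List Char) : toStrLoop v acc = acc := by
  rw [toStrLoop, if_neg h]

theorem toStrLoop_append : ∀ (k : Nat) (v : Int), v.toNat ≤ k →
    ∀ (acc : List Char), toStrLoop v acc = acc ++ toStrLoop v [] := by
  intro k
  induction k with
  | zero =>
    intro v hv acc
    have hnp : ¬ v > 0 := by omega
    rw [toStrLoop_stop v hnp, toStrLoop_stop v hnp]
    simp
  | succ m ih =>
    intro v hv acc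
    by_cases hp : v > 0
    · have hdec := toStrLoop_dec v hp
      rw [toStrLoop, if_pos hp]
      conv_rhs => rw [toStrLoop, if_pos hp]
      rw [ih _ (by omega), ih _ (by omega) ([] ++ _)]
      simp
    · rw [toStrLoop_stop v hp, toStrLoop_stop v hp]
      simp

-- the heart of the port equivalence: A's base-26 digits of v - rep k are
-- B's bijective-base-26 digits of v
theorem digits_eq : ∀ (k : Nat), 1 ≤ k → ∀ (v : Int), rep k ≤ v → v < rep (k + 1) →
    digitsA k (v - rep k) = toStrLoop v [] := by
  intro k
  induction k with
  | zero => intro h; omega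
  | succ m ih =>
    intro _ v hv1 hv2
    have hvpos : v > 0 := by
      have := rep_one_le (m + 1) (by omega)
      omega
    have hd := toStrLoop_dec v hvpos
    rw [toStrLoop, if_pos hvpos, toStrLoop_append (PySem.Int.floordiv (v - 1) 26).toNat _ (le_refl _)]
    simp only [List.nil_append, digitsA]
    have hrep : rep (m + 1) = 26 * rep m + 1 := rfl
    have hrep2 : rep (m + 2) = 26 * rep (m + 1) + 1 := rfl
    have hmod : PySem.Int.mod (v - rep (m + 1)) 26 = PySem.Int.mod (v - 1) 26 := by
      rw [PySem.Int.mod_eq_emod_of_pos (by norm_num), PySem.Int.mod_eq_emod_of_pos (by norm_num),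
        hrep]
      omega
    have hdiv : PySem.Int.floordiv (v - rep (m + 1)) 26 =
        PySem.Int.floordiv (v - 1) 26 - rep m := by
      rw [PySem.Int.floordiv_eq_ediv_of_pos (by norm_num), PySem.Int.floordiv_eq_ediv_of_pos (by norm_num),
        hrep]
      omega
    rw [hmod, hdiv]
    cases m with
    | zero =>
      -- one digit: the quotient hits zero on both sides
      have hq0 : PySem.Int.floordiv (v - 1) 26 = 0 := by
        rw [PySem.Int.floordiv_eq_ediv_of_pos (by norm_num)]
        have h27 : rep (0 + 1 + 1) = 27 := by norm_num [rep]
        omega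
      rw [hq0]
      simp only [digitsA]
      rw [toStrLoop_stop 0 (by decide)]
      simp
    | succ m' =>
      have e3 : rep (m' + 1 + 1 + 1) = 26 * rep (m' + 1 + 1) + 1 := rfl
      have e2 : rep (m' + 1 + 1) = 26 * rep (m' + 1) + 1 := rfl
      have hq1 : rep (m' + 1) ≤ PySem.Int.floordiv (v - 1) 26 := by
        rw [PySem.Int.floordiv_eq_ediv_of_pos (by norm_num)]
        omega
      have hq2 : PySem.Int.floordiv (v - 1) 26 < rep (m' + 1 + 1) := by
        rw [PySem.Int.floordiv_eq_ediv_of_pos (by norm_num)]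
        omega
      rw [ih (by omega) _ hq1 hq2]
      simp

theorem idxToStr_eq_toStr (v : Int) (hv : 1 ≤ v) : idxToStr v = toStr v := by
  obtain ⟨k, hk1, hk2, hk3⟩ := exists_digits v hv
  have hfind : findL v 1 = (k : Int) := by
    have h1 : ((1 : Nat) : Int) = 1 := rfl
    rw [← h1]
    exact findL_eq_aux v k hk2 hk3 (k - 1) 1 (by omega) (le_refl 1)
  have hsub : (k : Int) - 1 = ((k - 1 : Nat) : Int) := by push_cast [hk1]; ring
  have hgs : getSum ((k : Int) - 1) = rep k - 1 := by
    rw [hsub, getSum_eq (k - 1)]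
    congr 2
    omega
  simp only [idxToStr, toStr]
  rw [hfind, hgs]
  have hlen : (PySem.List.pyRange ((k : Int) - 1) (-1) (-1)).length = k := by
    rw [PySem.List.length_pyRange_neg_one]
    omega
  have hfold := foldA_digits (PySem.List.pyRange ((k : Int) - 1) (-1) (-1)) [] (v - (rep k - 1) - 1)
  rw [hlen] at hfold
  simp only [hfold, List.nil_append]
  have hval : v - (rep k - 1) - 1 = v - rep k := by ring
  rw [hval, digits_eq k hk1 v hk2 hk3]

-- the counting apparatus shared by both characterizations
theorem cntLe_nonneg (xs : List Int) (x : Int) : 0 ≤ cntLe xs x := by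
  unfold cntLe; positivity

theorem cntLe_cons (b : Int) (xs : List Int) (x : Int) :
    cntLe (b :: xs) x = (if b ≤ x then 1 else 0) + cntLe xs x := by
  unfold cntLe
  by_cases h : b ≤ x
  · simp [h]
    ring
  · simp [h]

theorem bisect_eq_cntLe (xs : List Int) (x : Int) (hp : List.Pairwise (· ≤ ·) xs) :
    (PySem.List.bisectRight xs x : Int) = cntLe xs x := by
  obtain ⟨hlen, hlo, hhi⟩ := PySem.List.bisectRight_spec xs x hp
  have hnat : xs.countP (fun b => decide (b ≤ x)) = PySem.List.bisectRight xs x := by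
    have hsplit : xs.countP (fun b => decide (b ≤ x))
        = (xs.take (PySem.List.bisectRight xs x)).countP (fun b => decide (b ≤ x))
          + (xs.drop (PySem.List.bisectRight xs x)).countP (fun b => decide (b ≤ x)) := by
      conv_lhs => rw [← List.take_append_drop (PySem.List.bisectRight xs x) xs]
      rw [List.countP_append]
    have h1 : (xs.take (PySem.List.bisectRight xs x)).countP (fun b => decide (b ≤ x))
        = (xs.take (PySem.List.bisectRight xs x)).length := by
      rw [List.countP_eq_length]
      intro a ha
      obtain ⟨j, hj, rfl⟩ := List.mem_iff_getElem.mp ha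
      have hj' : j < PySem.List.bisectRight xs x := lt_of_lt_of_le hj (by simp [List.length_take])
      have hjlen : j < xs.length := lt_of_lt_of_le hj' hlen
      have := hlo j hjlen hj'
      simp [List.getElem_take]
      exact this
    have h2 : (xs.drop (PySem.List.bisectRight xs x)).countP (fun b => decide (b ≤ x)) = 0 := by
      rw [List.countP_eq_zero]
      intro a ha
      obtain ⟨j, hj, rfl⟩ := List.mem_iff_getElem.mp ha
      rw [List.getElem_drop]
      have hjlen : PySem.List.bisectRight xs x + j < xs.length := by
        have := List.length_drop (l := xs) (i := PySem.List.bisectRight xs x)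
        omega
      have := hhi (PySem.List.bisectRight xs x + j) hjlen (by omega)
      simp
      omega
    rw [hsplit, h1, h2, List.length_take]
    omega
  unfold cntLe
  exact_mod_cast congrArg (Nat.cast : Nat → Int) hnat.symm

theorem cntLe_succ (xs : List Int) (x : Int) :
    cntLe xs (x + 1) = cntLe xs x + (xs.count (x + 1) : Int) := by
  unfold cntLe
  induction xs with
  | nil => simp
  | cons a t ih =>
    rw [List.count_cons]
    simp only [List.countP_cons]
    by_cases h1 : a ≤ x
    · have h2 : a ≤ x + 1 := by omega
      have h3 : ¬ a = x + 1 := by omega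
      simp [h1, h2, h3]
      push_cast at ih
      omega
    · by_cases h2 : a ≤ x + 1
      · have h3 : a = x + 1 := by omega
        simp [h3]
        push_cast at ih
        omega
      · have h3 : ¬ a = x + 1 := by omega
        simp [h1, h2, h3]
        push_cast at ih
        omega

-- the Pre_ non-monotonicity exclusion, transported to any permutation xs of A's ban indices
def MonoAt (xs : List Int) (n : Int) : Prop :=
  ∀ v ∈ xs, 2 ≤ xs.count v →
    (v - 1 - cntLe xs (v - 1) < n ∨ n + (xs.count v : Int) - 2 < v - 1 - cntLe xs (v - 1))

theorem step_mono (xs : List Int) (n : Int) (hpre : MonoAt xs n) (x : Int)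
    (hx : n ≤ x - cntLe xs x) : n ≤ (x + 1) - cntLe xs (x + 1) := by
  have hs := cntLe_succ xs x
  by_cases hm : 2 ≤ xs.count (x + 1)
  · have hmem : (x + 1) ∈ xs := List.count_pos_iff.mp (by omega)
    rcases hpre (x + 1) hmem hm with h | h
    · simp only [add_sub_cancel_right] at h
      omega
    · simp only [add_sub_cancel_right] at h
      omega
  · have : (xs.count (x + 1) : Int) ≤ 1 := by exact_mod_cast Nat.le_of_lt_succ (by omega)
    omega

theorem q_mono (xs : List Int) (n : Int) (hpre : MonoAt xs n) (x y : Int) (hxy : x ≤ y)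
    (hx : n ≤ x - cntLe xs x) : n ≤ y - cntLe xs y := by
  induction y, hxy using Int.le_induction with
  | base => exact hx
  | succ m hm ih => exact step_mono xs n hpre m ih

-- B's walk: characterization and an upper bound on where it stops
theorem walk_id (xs : List Int) (t : Int) (h : ∀ b ∈ xs, t < b) :
    xs.foldl (fun t b => if b ≤ t then t + 1 else t) t = t := by
  induction xs with
  | nil => rfl
  | cons a l ih =>
    have ha : ¬ a ≤ t := by have := h a (by simp); omega
    simp only [List.foldl_cons, if_neg ha]
    exact ih (fun b hb => h b (by simp [hb]))

theorem walk_le (xs : List Int) : ∀ (t : Int),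
    xs.foldl (fun t b => if b ≤ t then t + 1 else t) t ≤ t + (xs.length : Int) := by
  induction xs with
  | nil => simp
  | cons a l ih =>
    intro t
    simp only [List.foldl_cons, List.length_cons]
    by_cases h : a ≤ t
    · rw [if_pos h]
      have := ih (t + 1)
      push_cast
      omega
    · rw [if_neg h]
      have := ih t
      push_cast
      omega

theorem walk_spec (xs : List Int) (hs : List.Pairwise (· ≤ ·) xs) (n : Int) :
    n ≤ xs.foldl (fun t b => if b ≤ t then t + 1 else t) n ∧
    n ≤ (xs.foldl (fun t b => if b ≤ t then t + 1 else t) n) -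
        cntLe xs (xs.foldl (fun t b => if b ≤ t then t + 1 else t) n) ∧
    ∀ x, x < xs.foldl (fun t b => if b ≤ t then t + 1 else t) n → x - cntLe xs x < n := by
  induction xs generalizing n with
  | nil =>
    refine ⟨le_refl n, ?_, ?_⟩ <;> simp [cntLe]
  | cons b rest ih =>
    have hrest : List.Pairwise (· ≤ ·) rest := hs.of_cons
    have hbr : ∀ y ∈ rest, b ≤ y := fun y hy => List.rel_of_pairwise_cons hs hy
    by_cases hb : b ≤ n
    · simp only [List.foldl_cons, if_pos hb]
      obtain ⟨ih1, ih2, ih3⟩ := ih hrest (n + 1)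
      set T := rest.foldl (fun t b => if b ≤ t then t + 1 else t) (n + 1) with hT
      refine ⟨by omega, ?_, ?_⟩
      · rw [cntLe_cons, if_pos (by omega : b ≤ T)]
        omega
      · intro x hx
        rw [cntLe_cons]
        by_cases hbx : b ≤ x
        · rw [if_pos hbx]
          have := ih3 x hx
          omega
        · rw [if_neg hbx]
          have := cntLe_nonneg rest x
          omega
    · have hwb : ¬ b ≤ n := hb
      simp only [List.foldl_cons, if_neg hwb]
      rw [walk_id rest n (fun y hy => by have := hbr y hy; omega)]
      refine ⟨le_refl n, ?_, ?_⟩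
      · rw [cntLe_cons, if_neg hwb]
        have : cntLe rest n = 0 := by
          unfold cntLe
          rw [List.countP_eq_zero.mpr]
          · rfl
          · intro a ha
            have := hbr a ha
            simp; omega
        omega
      · intro x hx
        rw [cntLe_cons, if_neg (by omega : ¬ b ≤ x)]
        have : cntLe rest x = 0 := by
          unfold cntLe
          rw [List.countP_eq_zero.mpr]
          · rfl
          · intro a ha
            have := hbr a ha
            simp; omega
        omega

-- A's binary search: characterization
theorem bsearch_spec (xs : List Int) (hp : List.Pairwise (· ≤ ·) xs) (n : Int)
    (hq : MonoAt xs n) :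
    ∀ (k : Nat) (left right : Int), (right + 1 - left).toNat ≤ k → left ≤ right + 1 →
    (∀ x, 1 ≤ x → x < left → x - cntLe xs x < n) →
    (∀ x, right < x → x ≤ 10 ^ 15 → n ≤ x - cntLe xs x) →
    (∀ x, 1 ≤ x → x < bsearchLoop xs n left right → x - cntLe xs x < n) ∧
    (∀ x, bsearchLoop xs n left right ≤ x → x ≤ 10 ^ 15 → n ≤ x - cntLe xs x) ∧
    bsearchLoop xs n left right ≤ right + 1 ∧ left ≤ bsearchLoop xs n left right := by
  intro k
  induction k with
  | zero =>
    intro left right hk hlr hlo hhi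
    have hstop : ¬ left ≤ right := by omega
    rw [bsearchLoop, if_neg hstop]
    exact ⟨hlo, fun x hx hx' => hhi x (by omega) hx', by omega, le_refl left⟩
  | succ m ih =>
    intro left right hk hlr hlo hhi
    by_cases hgo : left ≤ right
    · rw [bsearchLoop, if_pos hgo]
      simp only
      obtain ⟨hm1, hm2⟩ := PySem.Int.floordiv_two_mid_bounds hgo
      set mid := PySem.Int.floordiv (left + right) 2 with hmid
      rw [bisect_eq_cntLe xs mid hp]
      by_cases hkept : mid - cntLe xs mid ≥ n
      · rw [if_pos hkept]
        have hhi' : ∀ x, mid - 1 < x → x ≤ 10 ^ 15 → n ≤ x - cntLe xs x := by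
          intro x hx hx'
          exact q_mono xs n hq mid x (by omega) hkept
        obtain ⟨c1, c2, c3, c4⟩ := ih left (mid - 1) (by omega) (by omega) hlo hhi'
        exact ⟨c1, c2, by omega, c4⟩
      · rw [if_neg hkept]
        have hlo' : ∀ x, 1 ≤ x → x < mid + 1 → x - cntLe xs x < n := by
          intro x _ hx
          by_contra hcon
          exact hkept (q_mono xs n hq x mid (by omega) (by omega))
        obtain ⟨c1, c2, c3, c4⟩ := ih (mid + 1) right (by omega) (by omega) hlo' hhi
        exact ⟨c1, c2, c3, by omega⟩
    · rw [bsearchLoop, if_neg hgo]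
      exact ⟨hlo, fun x hx hx' => hhi x (by omega) hx', by omega, le_refl left⟩

-- the two numberings agree on nonempty strings, and both sides count empty-string bans
-- below every x ≥ 1
theorem foldTwo (cs : List Char) : ∀ (a b : Int),
    cs.foldl (fun v c => v * 26 + ((c.toNat : Int) - 97 + 1)) a
      = cs.foldl (fun v c => v * 26 + ((c.toNat : Int) - 97)) b
        + 26 ^ cs.length * (a - b) + rep cs.length := by
  induction cs with
  | nil => intro a b; simp [rep]
  | cons c t ih =>
    intro a b
    simp only [List.foldl_cons, List.length_cons]
    rw [ih (a * 26 + ((c.toNat : Int) - 97 + 1)) (b * 26 + ((c.toNat : Int) - 97))]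
    have h1 : a * 26 + ((c.toNat : Int) - 97 + 1) - (b * 26 + ((c.toNat : Int) - 97))
        = 26 * (a - b) + 1 := by ring
    rw [h1, rep_succ' t.length]
    ring

theorem toNum_eq_strToIdx (s : String) (hs : s.toList ≠ []) : toNum s = strToIdx s := by
  unfold toNum strToIdx
  have hfold := foldTwo s.toList 0 0
  have hlen1 : 1 ≤ s.toList.length := by
    cases h : s.toList with
    | nil => exact absurd h hs
    | cons a t => simp
  have hL : PySem.Str.len s = (s.toList.length : Int) := PySem.Str.len_eq s
  have hsub : (s.toList.length : Int) - 1 = ((s.toList.length - 1 : Nat) : Int) := by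
    push_cast [hlen1]; ring
  simp only [hL, hsub]
  rw [getSum_eq (s.toList.length - 1)]
  have : s.toList.length - 1 + 1 = s.toList.length := by omega
  rw [this]
  simp only [hfold]
  ring

theorem cnt_bridge (bans : List String) (x : Int) (hx : 1 ≤ x) :
    cntLe (bans.map toNum) x = cntLe (bans.map strToIdx) x := by
  unfold cntLe
  rw [List.countP_map, List.countP_map]
  congr 1
  apply List.countP_congr
  intro s _
  by_cases hs : s.toList = []
  · -- empty string: A numbers it 1, B numbers it 0; both are ≤ x for x ≥ 1
    have hA : strToIdx s = 1 := by
      unfold strToIdx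
      rw [PySem.Str.len_eq s, hs]
      simp [getSum]
    have hB : toNum s = 0 := by
      unfold toNum
      rw [hs]
      rfl
    simp only [Function.comp_apply, hA, hB]
    simp
    omega
  · simp only [Function.comp_apply, toNum_eq_strToIdx s hs]

-- ===== VERDICT (by name: the statement is the Claim_ definition above) =====
theorem solution_spec : Claim_equal_solution := by
  intro n bans _hdom hpre
  obtain ⟨hn1, hcap, hpre3⟩ := hpre
  unfold Spec_solution solution solution_alt
  simp only
  set As := PySem.List.sorted (bans.map strToIdx) (fun x => x) false with hAs
  set Bs := PySem.List.sorted (bans.map toNum) (fun x => x) false with hBs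
  have hpermA : As.Perm (bans.map strToIdx) := PySem.List.sorted_perm _ _ _
  have hpermB : Bs.Perm (bans.map toNum) := PySem.List.sorted_perm _ _ _
  have hpA : List.Pairwise (· ≤ ·) As := PySem.List.sorted_pairwise (bans.map strToIdx) (fun x => x)
  have hpB : List.Pairwise (· ≤ ·) Bs := PySem.List.sorted_pairwise (bans.map toNum) (fun x => x)
  have hcntA : ∀ z, cntLe As z = cntLe (bans.map strToIdx) z := fun z =>
    congrArg (Nat.cast : Nat → Int) (hpermA.countP_eq _)
  have hcntB : ∀ z, cntLe Bs z = cntLe (bans.map toNum) z := fun z =>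
    congrArg (Nat.cast : Nat → Int) (hpermB.countP_eq _)
  have hbridge : ∀ z, 1 ≤ z → cntLe Bs z = cntLe As z := by
    intro z hz
    rw [hcntA, hcntB, cnt_bridge bans z hz]
  have hq : MonoAt As n := by
    intro v hv hc
    have hv' : v ∈ bans.map strToIdx := hpermA.mem_iff.mp hv
    have hcv : As.count v = (bans.map strToIdx).count v := hpermA.count_eq v
    rw [hcv] at hc ⊢
    rw [hcntA]
    exact hpre3 v hv' hc
  obtain ⟨w1, w2, w3⟩ := walk_spec Bs hpB n
  set T := Bs.foldl (fun t b => if b ≤ t then t + 1 else t) n with hT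
  have hTle : T ≤ n + (bans.length : Int) := by
    have h := walk_le Bs n
    have hlB : Bs.length = bans.length := by
      rw [hBs, PySem.List.length_sorted, List.length_map]
    rw [hlB] at h
    omega
  have hT1 : 1 ≤ T := by omega
  have hTcap : T ≤ 10 ^ 15 := by omega
  obtain ⟨b1, b2, b3, b4⟩ := bsearch_spec As hpA n hq ((10 ^ 15 + 1 - 1 : Int)).toNat 1 (10 ^ 15)
    (by omega) (by omega)
    (by intro x hx hx'; omega)
    (by intro x hx hx'; omega)
  set L := bsearchLoop As n 1 (10 ^ 15) with hL
  have hLT : L = T := by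
    by_contra hne
    rcases lt_or_gt_of_ne hne with hlt | hgt
    · -- L < T: L is admissible by the search, not yet reached by the walk
      have hL1 : 1 ≤ L := b4
      have h1 : n ≤ L - cntLe As L := b2 L (le_refl L) (by omega)
      have h2 : L - cntLe Bs L < n := w3 L hlt
      rw [hbridge L hL1] at h2
      omega
    · -- T < L: T is admissible by the walk, rejected by the search
      have h1 : T - cntLe As T < n := b1 T hT1 hgt
      have h2 : n ≤ T - cntLe Bs T := w2
      rw [hbridge T hT1] at h2
      omega
  rw [hLT]
  exact idxToStr_eq_toStr T hT1
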